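-- pv_equiv track=rewrite | github.com/Kunal7069/LINKEDIN_PROFILE_COMPARISON | src/stats_estimator/engagement_analysis.py | get_time_slot
-- ===== SOURCE A (Python) =====
-- def get_time_slot(hour, minute):
--     """Returns a time bucket label based on hour and minute"""
--     total_minutes = hour * 60 + minute
--
--     # Define time slots (start minute, end minute, label)
--     time_slots = [
--         (1, 180, '12am-3am'),
--         (181, 360, '3am-6am'),
--         (361, 540, '6am-9am'),
--         (541, 720, '9am-12pm'),
--         (721, 900, '12pm-3pm'),
--         (901, 1080, '3pm-6pm'),
--         (1081, 1260, '6pm-9pm'),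
--         (1261, 1440, '9pm-12am')
--     ]
--
--     for start, end, label in time_slots:
--         if start <= total_minutes <= end:
--             return label
--     return 'unknown'  # fallback
-- ===== SOURCE B (Python) =====
-- def get_time_slot(hour, minute):
--     """Returns a time bucket label based on hour and minute"""
--     total_minutes = hour * 60 + minute
--     if not (1 <= total_minutes <= 1440):
--         return 'unknown'
--     labels = ['12am-3am', '3am-6am', '6am-9am', '9am-12pm',
--               '12pm-3pm', '3pm-6pm', '6pm-9pm', '9pm-12am']
--     return labels[(total_minutes - 1) // 180]
-- ===== Notes on version B (the rewrite author's own statement) =====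
-- stated objective: simpler
-- what changed: Replaced the linear scan over eight explicit (start,end,label) ranges with a single range guard plus an index lookup labels[(total_minutes-1)//180].
import Mathlib
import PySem

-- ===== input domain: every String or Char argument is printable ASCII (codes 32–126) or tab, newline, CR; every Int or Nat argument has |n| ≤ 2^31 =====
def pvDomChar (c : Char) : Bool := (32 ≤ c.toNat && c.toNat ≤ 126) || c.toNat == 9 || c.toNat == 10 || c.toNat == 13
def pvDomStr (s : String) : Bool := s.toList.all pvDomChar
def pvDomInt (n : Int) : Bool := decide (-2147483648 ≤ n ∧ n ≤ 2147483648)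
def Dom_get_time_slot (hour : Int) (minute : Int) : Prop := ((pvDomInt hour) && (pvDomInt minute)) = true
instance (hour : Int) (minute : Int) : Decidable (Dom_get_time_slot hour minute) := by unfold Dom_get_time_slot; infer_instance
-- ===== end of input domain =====

-- B replaces A's linear scan over eight explicit (start,end,label) ranges with a
-- range guard plus one floor-division index lookup (objective: simpler).


-- ===== PORT A =====
-- A's loop over the literal slot list, in order; first matching range wins.
def pvSlotsA : List (Int × Int × String) :=
  [(1, 180, "12am-3am"), (181, 360, "3am-6am"), (361, 540, "6am-9am"),
   (541, 720, "9am-12pm"), (721, 900, "12pm-3pm"), (901, 1080, "3pm-6pm"),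
   (1081, 1260, "6pm-9pm"), (1261, 1440, "9pm-12am")]

def pvScanA (t : Int) : List (Int × Int × String) → String
  | [] => "unknown"
  | (s, e, l) :: rest => if s ≤ t ∧ t ≤ e then l else pvScanA t rest

def get_time_slot (hour : Int) (minute : Int) : String :=
  pvScanA (hour * 60 + minute) pvSlotsA

-- ===== PORT B =====
def pvLabelsB : List String :=
  ["12am-3am", "3am-6am", "6am-9am", "9am-12pm",
   "12pm-3pm", "3pm-6pm", "6pm-9pm", "9pm-12am"]

-- the guard keeps the index in range, so the list indexing never fails in Source B;
-- an out-of-range pyGet? (impossible here) is rendered as "unknown"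
def get_time_slot_alt (hour : Int) (minute : Int) : String :=
  let t := hour * 60 + minute
  if 1 ≤ t ∧ t ≤ 1440 then
    (PySem.List.pyGet? pvLabelsB (PySem.Int.floordiv (t - 1) 180)).getD "unknown"
  else "unknown"

-- ===== PRECONDITION & SPEC =====
def Spec_get_time_slot (hour : Int) (minute : Int) (out : String) : Prop := out = get_time_slot_alt hour minute
instance (hour : Int) (minute : Int) (out : String) : Decidable (Spec_get_time_slot hour minute out) := by unfold Spec_get_time_slot; infer_instance

-- ===== CLAIM (what is proved, stated in full; the proofs are below) =====
def Claim_equal_get_time_slot : Prop := ∀ (hour : Int) (minute : Int), Dom_get_time_slot hour minute → Spec_get_time_slot hour minute (get_time_slot hour minute)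

-- ===== LEMMAS AND PROOFS =====

-- both sides as a function of total_minutes alone
theorem pv_core (t : Int) :
    pvScanA t pvSlotsA =
      (if 1 ≤ t ∧ t ≤ 1440 then
        (PySem.List.pyGet? pvLabelsB (PySem.Int.floordiv (t - 1) 180)).getD "unknown"
      else "unknown") := by
  have h180 : (0:Int) < 180 := by norm_num
  have hq := PySem.Int.floordiv_eq_ediv_of_pos (a := t - 1) h180
  simp only [pvSlotsA, pvScanA]
  rw [hq]
  by_cases h : 1 ≤ t ∧ t ≤ 1440
  · rw [if_pos h]
    rcases h with ⟨h1, h2⟩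
    by_cases c1 : t ≤ 180
    · rw [if_pos (by omega), show (t - 1) / 180 = 0 by omega]
      decide
    · by_cases c2 : t ≤ 360
      · rw [if_neg (by omega), if_pos (by omega), show (t - 1) / 180 = 1 by omega]
        decide
      · by_cases c3 : t ≤ 540
        · rw [if_neg (by omega), if_neg (by omega), if_pos (by omega), show (t - 1) / 180 = 2 by omega]
          decide
        · by_cases c4 : t ≤ 720
          · rw [if_neg (by omega), if_neg (by omega), if_neg (by omega), if_pos (by omega), show (t - 1) / 180 = 3 by omega]
            decide
          · by_cases c5 : t ≤ 900
            · rw [if_neg (by omega), if_neg (by omega), if_neg (by omega), if_neg (by omega), if_pos (by omega), show (t - 1) / 180 = 4 by omega]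
              decide
            · by_cases c6 : t ≤ 1080
              · rw [if_neg (by omega), if_neg (by omega), if_neg (by omega), if_neg (by omega), if_neg (by omega), if_pos (by omega), show (t - 1) / 180 = 5 by omega]
                decide
              · by_cases c7 : t ≤ 1260
                · rw [if_neg (by omega), if_neg (by omega), if_neg (by omega), if_neg (by omega), if_neg (by omega), if_neg (by omega), if_pos (by omega), show (t - 1) / 180 = 6 by omega]
                  decide
                · rw [if_neg (by omega), if_neg (by omega), if_neg (by omega), if_neg (by omega), if_neg (by omega), if_neg (by omega), if_neg (by omega), if_pos (by omega), show (t - 1) / 180 = 7 by omega]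
                  decide
  · rw [if_neg h, if_neg (by omega), if_neg (by omega), if_neg (by omega), if_neg (by omega),
      if_neg (by omega), if_neg (by omega), if_neg (by omega), if_neg (by omega)]

-- ===== VERDICT (by name: the statement is the Claim_ definition above) =====
theorem get_time_slot_spec : Claim_equal_get_time_slot := by
  intro hour minute _
  unfold Spec_get_time_slot get_time_slot get_time_slot_alt
  exact pv_core (hour * 60 + minute)
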